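-- pv_equiv track=rewrite | github.com/Gatanot/Python | try.py | developMatrix
-- ===== SOURCE A (Python) =====
-- def developMatrix(matrix, size):
--     developedMatrix = []
--     for i in range(0, size + 2):
--         tempList = []
--         if i == 0:
--             for j in range(0, size + 2):
--                 if j == 0:
--                     tempList.append(matrix[size - 1][size - 1])
--                 elif j == size + 1:
--                     tempList.append(matrix[size - 1][0])
--                 else:
--                     tempList.append(matrix[size - 1][j - 1])
--         elif i == size + 1:
--             for j in range(0, size + 2):
--                 if j == 0:
--                     tempList.append(matrix[0][size - 1])
--                 elif j == size + 1:
--                     tempList.append(matrix[0][0])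
--                 else:
--                     tempList.append(matrix[0][j - 1])
--         else:
--             for j in range(0, size + 2):
--                 if j == 0:
--                     tempList.append(matrix[i - 1][size - 1])
--                 elif j == size + 1:
--                     tempList.append(matrix[i - 1][0])
--                 else:
--                     tempList.append(matrix[i - 1][j - 1])
--         developedMatrix.append(tempList)
--     return developedMatrix
-- ===== SOURCE B (Python) =====
-- def developMatrix(matrix, size):
--     rows = [matrix[size - 1]] + matrix[:size] + [matrix[0]]
--     return [[row[size - 1]] + row[:size] + [row[0]] for row in rows]
-- ===== Notes on version B (the rewrite author's own statement) =====
-- stated objective: simpler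
-- what changed: B builds the padded matrix by whole-list concatenation and slicing ([last] + xs[:size] + [first], applied once to the row list and once per row) instead of A's per-element index loops with a three-way if/elif border case analysis.
-- outside the precondition, e.g. on developMatrix([[1]], -2): A returns [], B raises IndexError
import Mathlib
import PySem

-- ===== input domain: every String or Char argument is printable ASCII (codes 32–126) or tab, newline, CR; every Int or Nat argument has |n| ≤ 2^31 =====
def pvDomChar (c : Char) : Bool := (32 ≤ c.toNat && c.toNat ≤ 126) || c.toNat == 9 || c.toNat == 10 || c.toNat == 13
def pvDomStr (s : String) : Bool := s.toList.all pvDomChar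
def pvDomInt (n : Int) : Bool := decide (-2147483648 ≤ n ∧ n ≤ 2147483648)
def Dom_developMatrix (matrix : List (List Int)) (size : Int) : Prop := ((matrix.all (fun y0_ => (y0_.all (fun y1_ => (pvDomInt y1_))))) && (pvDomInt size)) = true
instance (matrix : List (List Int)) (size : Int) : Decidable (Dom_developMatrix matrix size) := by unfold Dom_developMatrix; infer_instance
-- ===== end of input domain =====

-- B builds the padded matrix by whole-list concatenation and slicing ([last] + xs[:size] + [first],
-- once on the row list and once per row) instead of A's per-element loops with border branches
-- (objective: simpler).

-- ===== PORT A =====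
-- matrix[r][c] (always in range under Pre_; Python's negative indices wrap, as pyGetD does)
def pvIdx (matrix : List (List Int)) (r c : Int) : Int :=
  PySem.List.pyGetD (PySem.List.pyGetD matrix r []) c 0

def developMatrix (matrix : List (List Int)) (size : Int) : List (List Int) :=
  (PySem.List.pyRange 0 (size + 2) 1).foldl (fun dev i =>
    dev ++ [
      if i = 0 then
        (PySem.List.pyRange 0 (size + 2) 1).foldl (fun t j =>
          t ++ [if j = 0 then pvIdx matrix (size - 1) (size - 1)
                else if j = size + 1 then pvIdx matrix (size - 1) 0
                else pvIdx matrix (size - 1) (j - 1)]) []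
      else if i = size + 1 then
        (PySem.List.pyRange 0 (size + 2) 1).foldl (fun t j =>
          t ++ [if j = 0 then pvIdx matrix 0 (size - 1)
                else if j = size + 1 then pvIdx matrix 0 0
                else pvIdx matrix 0 (j - 1)]) []
      else
        (PySem.List.pyRange 0 (size + 2) 1).foldl (fun t j =>
          t ++ [if j = 0 then pvIdx matrix (i - 1) (size - 1)
                else if j = size + 1 then pvIdx matrix (i - 1) 0
                else pvIdx matrix (i - 1) (j - 1)]) []
    ]) []

-- ===== PORT B =====
-- [row[size-1]] + row[:size] + [row[0]]
def pvWrap (size : Int) (row : List Int) : List Int :=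
  [PySem.List.pyGetD row (size - 1) 0] ++ PySem.List.slice row none (some size) ++
    [PySem.List.pyGetD row 0 0]

def developMatrix_alt (matrix : List (List Int)) (size : Int) : List (List Int) :=
  ([PySem.List.pyGetD matrix (size - 1) []] ++ PySem.List.slice matrix none (some size) ++
    [PySem.List.pyGetD matrix 0 []]).map (pvWrap size)

-- ===== PRECONDITION & SPEC =====
-- Pre_ is where the Python A returns AND B computes the same value: size >= 1 with at least size
-- rows whose first size rows have at least size entries (otherwise A raises IndexError), or
-- size = 0 with nonempty first and last rows (A returns the 2x2 corner matrix via Python's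
-- negative-index wraparound, and B's slicing produces the same value there).
-- Pre_ excludes negative size, outside the function's natural domain (size is the matrix
-- dimension): A there returns [] (empty loops) or a degenerate wraparound value, while B's
-- slicing construction raises IndexError or returns a different shape.
def Pre_developMatrix (matrix : List (List Int)) (size : Int) : Prop :=
  (1 ≤ size ∧ size ≤ (matrix.length : Int) ∧
    ∀ row ∈ matrix.take size.toNat, size ≤ (row.length : Int)) ∨
  (size = 0 ∧ matrix ≠ [] ∧ matrix.headD [] ≠ [] ∧ matrix.getLastD [] ≠ [])
instance (matrix : List (List Int)) (size : Int) : Decidable (Pre_developMatrix matrix size) := by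
  unfold Pre_developMatrix; infer_instance

def pvWitness_developMatrix : List (List Int) × Int := ([[1, 2], [3, 4]], 2)

def Spec_developMatrix (matrix : List (List Int)) (size : Int) (out : List (List Int)) : Prop := out = developMatrix_alt matrix size
instance (matrix : List (List Int)) (size : Int) (out : List (List Int)) : Decidable (Spec_developMatrix matrix size out) := by unfold Spec_developMatrix; infer_instance

-- ===== CLAIM (what is proved, stated in full; the proofs are below) =====
def Claim_equal_developMatrix : Prop := ∀ (matrix : List (List Int)) (size : Int), Dom_developMatrix matrix size → Pre_developMatrix matrix size → Spec_developMatrix matrix size (developMatrix matrix size)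

-- ===== LEMMAS AND PROOFS =====

-- A's inner loop over one source row, named so both outer branches can be rewritten to it
def pvInner (matrix : List (List Int)) (size r : Int) : List Int :=
  (PySem.List.pyRange 0 (size + 2) 1).foldl (fun t j =>
    t ++ [if j = 0 then pvIdx matrix r (size - 1)
          else if j = size + 1 then pvIdx matrix r 0
          else pvIdx matrix r (j - 1)]) []

-- range(0, size+2) split into first element, middle, last element (size >= 1)
theorem pv_range_split (size : Int) (hs : 1 ≤ size) :
    PySem.List.pyRange 0 (size + 2) 1 =
      0 :: (PySem.List.pyRange 1 (size + 1) 1 ++ [size + 1]) := by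
  rw [show size + 2 = (size + 1) + 1 by ring,
      PySem.List.pyRange_one_succ_right (by omega),
      PySem.List.pyRange_one_cons (by omega)]
  norm_num

-- mapping g (xs[j-1]) over range(1, n+1) is mapping g over the first n elements of xs
theorem pv_mid {α β : Type} (g : α → β) (xs : List α) (d : α) :
    ∀ (n : Nat), n ≤ xs.length →
      (PySem.List.pyRange 1 ((n : Int) + 1) 1).map
          (fun j => g (PySem.List.pyGetD xs (j - 1) d)) = (xs.take n).map g := by
  intro n
  induction n with
  | zero =>
      intro _
      rw [PySem.List.pyRange_one_eq_nil (by omega)]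
      simp
  | succ k ih =>
      intro h
      have hcast : ((k + 1 : Nat) : Int) + 1 = ((k : Int) + 1) + 1 := by omega
      rw [hcast, PySem.List.pyRange_one_succ_right (by omega), List.map_append, ih (by omega)]
      have hval : g (PySem.List.pyGetD xs (((k : Int) + 1) - 1) d) = g (xs.getD k d) := by
        rw [show ((k : Int) + 1) - 1 = ((k : Nat) : Int) by omega,
            PySem.List.pyGetD_natCast]
      rw [List.map_singleton, hval, List.getD_eq_getElem _ _ (by omega),
          List.take_add_one, List.getElem?_eq_getElem (by omega),
          Option.toList_some, List.map_append, List.map_singleton]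

-- the identity-function instance of pv_mid, used for the inner (per-row) loops
theorem pv_mid_id (xs : List Int) (n : Nat) (h : n ≤ xs.length) :
    (PySem.List.pyRange 1 ((n : Int) + 1) 1).map
        (fun j => PySem.List.pyGetD xs (j - 1) 0) = xs.take n := by
  have hmid := pv_mid (fun x => x) xs 0 n h
  simpa using hmid

-- B's row wrap equals A's inner loop on the same source row (size >= 1, row long enough)
theorem pv_row_eq (matrix : List (List Int)) (size r : Int) (hs : 1 ≤ size)
    (hlen : size ≤ ((PySem.List.pyGetD matrix r []).length : Int)) :
    pvInner matrix size r = pvWrap size (PySem.List.pyGetD matrix r []) := by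
  unfold pvInner pvWrap
  rw [PySem.List.foldl_append_singleton_eq_map, pv_range_split size hs,
      PySem.List.slice_to _ (show (0:Int) ≤ size by omega)]
  simp only [List.map_cons, List.map_append, List.nil_append, List.cons_append]
  congr 1
  rw [List.map_nil, if_neg (show ¬((size:Int) + 1 = 0) by omega), if_true]
  congr 1
  · have hmid := pv_mid_id (PySem.List.pyGetD matrix r []) size.toNat (by omega)
    rw [Int.toNat_of_nonneg (by omega)] at hmid
    rw [← hmid]
    apply List.map_congr_left
    intro j hj
    rw [PySem.List.mem_pyRange_one] at hj
    rw [if_neg (by omega), if_neg (by omega)]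
    rfl

-- ===== VERDICT (by name: the statement is the Claim_ definition above) =====
theorem developMatrix_spec : Claim_equal_developMatrix := by
  intro matrix size _ hpre
  unfold Spec_developMatrix
  rcases hpre with ⟨hs, hlen, hrow⟩ | ⟨hz, hne, hh, hl⟩
  · -- size >= 1: every source row A touches is an element of matrix.take size.toNat
    have hrowlen : ∀ r : Int, 0 ≤ r → r < size →
        size ≤ ((PySem.List.pyGetD matrix r []).length : Int) := by
      intro r h0 hr
      apply hrow
      rw [PySem.List.pyGetD_eq_getElem matrix [] h0 (by omega)]
      have hk2 : r.toNat < (matrix.take size.toNat).length := by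
        rw [List.length_take]; omega
      rw [show matrix[r.toNat] = (matrix.take size.toNat)[r.toNat] from
            (List.getElem_take (h := hk2)).symm]
      exact List.getElem_mem _
    show developMatrix matrix size = developMatrix_alt matrix size
    unfold developMatrix
    rw [PySem.List.foldl_append_singleton_eq_map]
    show [] ++ List.map (fun i =>
        if i = 0 then pvInner matrix size (size - 1)
        else if i = size + 1 then pvInner matrix size 0
        else pvInner matrix size (i - 1)) (PySem.List.pyRange 0 (size + 2) 1)
      = developMatrix_alt matrix size
    unfold developMatrix_alt
    rw [pv_range_split size hs,
        PySem.List.slice_to _ (show (0:Int) ≤ size by omega)]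
    simp only [List.map_cons, List.map_append, List.nil_append, List.cons_append]
    congr 1
    · rw [if_true]
      exact pv_row_eq matrix size (size - 1) hs (hrowlen _ (by omega) (by omega))
    rw [List.map_nil, if_neg (show ¬((size:Int) + 1 = 0) by omega), if_true]
    congr 1
    · have hmid := pv_mid (pvWrap size) matrix [] size.toNat (by omega)
      rw [Int.toNat_of_nonneg (by omega)] at hmid
      rw [← hmid]
      apply List.map_congr_left
      intro i hi
      rw [PySem.List.mem_pyRange_one] at hi
      rw [if_neg (by omega), if_neg (by omega)]
      exact pv_row_eq matrix size (i - 1) hs (hrowlen _ (by omega) (by omega))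
    · rw [pv_row_eq matrix size 0 hs (hrowlen _ (by omega) (by omega))]
      simp
  · -- size = 0: both sides are the 2x2 corner matrix built from the four wrapped corners
    subst hz
    show developMatrix matrix 0 = developMatrix_alt matrix 0
    have hr : PySem.List.pyRange 0 (0 + 2) 1 = [0, 1] := by decide
    unfold developMatrix developMatrix_alt pvWrap pvIdx
    rw [hr]
    norm_num [PySem.List.slice_to]
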